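-- pv_equiv track=rewrite | github.com/atorulia/codewars-python | Basic_DeNico.py | de_nico
-- ===== SOURCE A (Python) =====
-- def de_nico(key, message):
--     """
--     :param key: string consists of unique letters and digits
--     :param message: string with encoded message
--     :return: decoded message using the key.
--     """
--     key_length = len(key)
--     order = [sorted(key).index(character) for character in key]
--     split_message = [message[i:i+key_length] for i in range(0, len(message), key_length)]
--
--     decoded_message = ""
--
--     for part in split_message:
--         for index in order:
--             if index < len(part):
--                 decoded_message += part[index]
--
--     return decoded_message.rstrip()
-- ===== SOURCE B (Python) =====
-- def de_nico(key, message):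
--     n = len(key)
--     srt = sorted(key)
--     order = [srt.index(c) for c in key]
--     cols = [message[c::n] for c in range(n)]
--     rows = len(cols[0]) if cols else 0
--     chars = []
--     for r in range(rows):
--         for j in order:
--             col = cols[j]
--             if r < len(col):
--                 chars.append(col[r])
--     return ''.join(chars).rstrip()
-- ===== Notes on version B (the rewrite author's own statement) =====
-- stated objective: faster
-- what changed: B never splits the message into row blocks: it extracts the n stride columns message[c::n], permutes them via the rank array, and re-reads the (ragged) column grid row-major into a list joined once, instead of A's block-split with per-row permuted indexing and repeated string concatenation.
import Mathlib
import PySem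

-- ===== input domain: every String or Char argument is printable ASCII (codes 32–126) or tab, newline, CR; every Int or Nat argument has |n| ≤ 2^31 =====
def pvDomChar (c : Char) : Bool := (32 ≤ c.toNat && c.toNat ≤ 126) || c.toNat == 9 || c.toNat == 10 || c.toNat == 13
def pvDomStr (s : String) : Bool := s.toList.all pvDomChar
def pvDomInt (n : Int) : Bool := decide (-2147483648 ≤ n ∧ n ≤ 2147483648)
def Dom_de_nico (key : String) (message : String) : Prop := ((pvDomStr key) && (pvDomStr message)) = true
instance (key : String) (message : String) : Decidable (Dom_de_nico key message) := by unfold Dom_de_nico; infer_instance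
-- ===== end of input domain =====

-- B re-reads the message through permuted stride columns joined once instead of A's row-block split with repeated string concatenation (measured faster).

-- ===== PORT A =====
def de_nico (key : String) (message : String) : String :=
  let k := key.toList
  let m := message.toList
  let keyLength : Int := (k.length : Int)
  -- sorted(key).index(c): c ∈ key ⊆ sorted(key), so index? is always some; getD 0 is its total form
  let order : List Int :=
    k.map (fun c => (((PySem.List.index? (PySem.List.sorted k (fun c => c)) c).getD 0 : Nat) : Int))
  let splitMessage : List (List Char) :=
    (PySem.List.pyRange 0 (m.length : Int) keyLength).map
      (fun i => PySem.List.slice m (some i) (some (i + keyLength)))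
  let decoded : List Char :=
    splitMessage.foldl (fun acc part =>
      order.foldl (fun acc2 idx =>
        if idx < (part.length : Int) then
          acc2 ++ [PySem.List.pyGetD part idx ' ']
        else acc2) acc) []
  String.ofList (PySem.Chars.rstrip decoded)

-- ===== PORT B =====
def de_nico_alt (key : String) (message : String) : String :=
  let k := key.toList
  let m := message.toList
  let n : Int := (k.length : Int)
  let srt := PySem.List.sorted k (fun c => c)
  let order : List Int := k.map (fun c => (((PySem.List.index? srt c).getD 0 : Nat) : Int))
  -- cols[c] = message[c::n]; slice? is some since n ≠ 0 under Pre_, getD [] is its total form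
  let cols : List (List Char) :=
    (PySem.List.pyRange 0 n 1).map (fun c => (PySem.List.slice? m (some c) none n).getD [])
  let rows : Int := if cols.isEmpty then 0 else ((cols.headD []).length : Int)
  let chars : List Char :=
    (PySem.List.pyRange 0 rows 1).foldl (fun acc r =>
      order.foldl (fun acc2 j =>
        if r < ((PySem.List.pyGetD cols j []).length : Int) then
          acc2 ++ [PySem.List.pyGetD (PySem.List.pyGetD cols j []) r ' ']
        else acc2) acc) []
  String.ofList (PySem.Chars.rstrip chars)

-- ===== PRECONDITION & SPEC =====
-- Pre_ excludes only the empty key, on which A raises ValueError (range() with step 0).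
def Pre_de_nico (key : String) (message : String) : Prop := key ≠ ""
instance (key : String) (message : String) : Decidable (Pre_de_nico key message) := by unfold Pre_de_nico; infer_instance
def pvWitness_de_nico : String × String := ("ab", "badc")

def Spec_de_nico (key : String) (message : String) (out : String) : Prop := out = de_nico_alt key message
instance (key : String) (message : String) (out : String) : Decidable (Spec_de_nico key message out) := by unfold Spec_de_nico; infer_instance

-- ===== CLAIM (what is proved, stated in full; the proofs are below) =====
def Claim_equal_de_nico : Prop := ∀ (key : String) (message : String), Dom_de_nico key message → Pre_de_nico key message → Spec_de_nico key message (de_nico key message)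

-- ===== LEMMAS AND PROOFS =====

-- a foldl that conditionally appends one element is a flatMap
theorem pvFoldlIf {β γ : Type} (l : List β) (P : β → Prop) [DecidablePred P] (f : β → γ)
    (acc : List γ) :
    l.foldl (fun a i => if P i then a ++ [f i] else a) acc
      = acc ++ l.flatMap (fun i => if P i then [f i] else []) := by
  induction l generalizing acc with
  | nil => simp
  | cons x xs ih =>
    simp only [List.foldl_cons, List.flatMap_cons]
    by_cases h : P x <;> simp [h, ih]

-- A's (and B's) nested accumulate-loop is a double flatMap
theorem pvNested {α β γ : Type} (xs : List α) (ord : List β) (P : α → β → Prop)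
    [∀ a b, Decidable (P a b)] (f : α → β → γ) :
    xs.foldl (fun acc x => ord.foldl (fun a2 i => if P x i then a2 ++ [f x i] else a2) acc) []
      = xs.flatMap (fun x => ord.flatMap (fun i => if P x i then [f x i] else [])) := by
  simp only [pvFoldlIf]
  simpa using PySem.List.foldl_append_eq_flatMap
    (fun x => ord.flatMap fun i => if P x i then [f x i] else []) xs []

-- a guarded indexed singleton is Option.toList of getElem?
theorem pvGuardGet {α : Type} (l : List α) (i : Nat) (d : α) :
    (if (i : Int) < (l.length : Int) then [PySem.List.pyGetD l (i : Int) d] else [])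
      = (l[i]?).toList := by
  by_cases h : i < l.length
  · rw [if_pos (by exact_mod_cast h), PySem.List.pyGetD_natCast, List.getD_eq_getElem?_getD,
      List.getElem?_eq_getElem h]
    rfl
  · rw [if_neg (by exact_mod_cast h), List.getElem?_eq_none (by omega)]
    rfl

-- every rank in order is a Nat cast of some p < len(key)
theorem pvOrderLt (k : List Char) :
    ∀ i ∈ k.map (fun c => (((PySem.List.index? (PySem.List.sorted k (fun c => c)) c).getD 0 : Nat) : Int)),
      ∃ p : Nat, i = (p : Int) ∧ p < k.length := by
  intro i hi
  obtain ⟨c, hc, rfl⟩ := List.mem_map.1 hi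
  have hmem : c ∈ PySem.List.sorted k (fun c => c) := (PySem.List.mem_sorted _ _ _ _).2 hc
  have hs : (PySem.List.index? (PySem.List.sorted k (fun c => c)) c).isSome :=
    (PySem.List.index?_isSome_iff _ _).2 hmem
  obtain ⟨p, hp⟩ := Option.isSome_iff_exists.1 hs
  obtain ⟨pre, suf, heq, hlen, -⟩ := (PySem.List.index?_eq_some_iff _ _ _).1 hp
  have hplt : p < (PySem.List.sorted k (fun c => c)).length := by
    rw [heq, List.length_append, List.length_cons, ← hlen]; omega
  refine ⟨(PySem.List.index? (PySem.List.sorted k (fun c => c)) c).getD 0, rfl, ?_⟩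
  rw [hp]
  simpa [PySem.List.length_sorted] using hplt

-- r < ⌈a/n⌉ ↔ n·r < a
theorem pvLtCeil (a nI : Int) (hn : 0 < nI) (r : Nat) :
    r < ((a + nI - 1) / nI).toNat ↔ nI * (r : Int) < a := by
  rw [Int.lt_toNat, Int.lt_iff_add_one_le, Int.le_ediv_iff_mul_le hn]
  constructor <;> intro h <;> nlinarith

-- message[c::n] as an explicit map over a ceil-count range
theorem pvColEq (m : List Char) (nN : Nat) (hn : 0 < nN) (c : Nat) :
    (PySem.List.slice? m (some (c : Int)) none (nN : Int)).getD []
      = (List.range ((((m.length : Int) - min (c : Int) (m.length : Int) + nN - 1) / nN).toNat)).map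
          (fun kk => m.getD (c + nN * kk) ' ') := by
  have h0 : ¬ ((nN : Int) = 0) := by omega
  have hneg : ¬ ((nN : Int) < 0) := by omega
  have hc0 : ¬ ((c : Int) < 0) := by omega
  have hpos : (0 : Int) < nN := by omega
  simp only [PySem.List.slice?, PySem.List.sliceIndices, if_neg h0, if_neg hneg, if_neg hc0,
    if_pos hpos]
  by_cases hcl : c < m.length
  · have hmin : min (c : Int) (m.length : Int) = (c : Int) := by omega
    rw [hmin, if_pos (by exact_mod_cast hcl)]
    rw [Option.getD_some]
    rw [List.filterMap_congr (g := fun x => some (m.getD (c + nN * x) ' ')) ?_]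
    · rw [show (fun x => some (m.getD (c + nN * x) ' ')) = some ∘ (fun x => m.getD (c + nN * x) ' ')
        from rfl, List.filterMap_eq_map]
    · intro x hx
      rw [List.mem_range] at hx
      have hlt : (nN : Int) * x < (m.length : Int) - c := (pvLtCeil _ _ hpos x).1 hx
      have hidx : c + nN * x < m.length := by push_cast at hlt ⊢; omega
      have htn : ((c : Int) + (nN : Int) * (x : Int)).toNat = c + nN * x := by
        push_cast; omega
      simp [htn, List.getElem?_eq_getElem hidx, List.getD_eq_getElem?_getD]
  · have hmin : min (c : Int) (m.length : Int) = (m.length : Int) := by omega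
    rw [hmin, if_neg (by omega), Option.getD_some]
    have : ((m.length : Int) - (m.length : Int) + nN - 1) / nN = 0 := by
      rw [show (m.length : Int) - (m.length : Int) + nN - 1 = nN - 1 by ring]
      exact Int.ediv_eq_zero_of_lt (by omega) (by omega)
    rw [this]
    simp

theorem pvColGet (m : List Char) (nN : Nat) (hn : 0 < nN) (c r : Nat) :
    ((PySem.List.slice? m (some (c : Int)) none (nN : Int)).getD [])[r]? = m[c + nN * r]? := by
  have hpos : (0 : Int) < nN := by omega
  rw [pvColEq m nN hn c, List.getElem?_map]
  by_cases h : r < (((m.length : Int) - min (c : Int) (m.length : Int) + nN - 1) / nN).toNat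
  · have hlt : (nN : Int) * r < (m.length : Int) - min (c : Int) (m.length : Int) :=
      (pvLtCeil _ _ hpos r).1 h
    have hidx : c + nN * r < m.length := by
      by_cases hcl : (m.length : Int) ≤ (c : Int)
      · have : min (c : Int) (m.length : Int) = (m.length : Int) := by omega
        rw [this] at hlt; omega
      · have : min (c : Int) (m.length : Int) = (c : Int) := by omega
        rw [this] at hlt; push_cast at hlt; omega
    rw [List.getElem?_range h, List.getElem?_eq_getElem hidx]
    simp [List.getD_eq_getElem?_getD, List.getElem?_eq_getElem hidx]
  · rw [List.getElem?_eq_none (by simpa [List.length_range] using h)]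
    have hge : m.length ≤ c + nN * r := by
      rw [pvLtCeil _ _ hpos r] at h
      by_cases hcl : (m.length : Int) ≤ (c : Int)
      · omega
      · have : min (c : Int) (m.length : Int) = (c : Int) := by omega
        rw [this] at h; push_cast at h; omega
    rw [List.getElem?_eq_none hge]
    rfl

theorem pvCol0Len (m : List Char) (nN : Nat) (hn : 0 < nN) :
    ((PySem.List.slice? m (some (0 : Int)) none (nN : Int)).getD []).length
      = (((m.length : Int) + nN - 1) / nN).toNat := by
  have h := pvColEq m nN hn 0
  rw [Nat.cast_zero] at h
  rw [h, List.length_map, List.length_range]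
  have hm : min (0 : Int) (m.length : Int) = 0 := by omega
  rw [hm, sub_zero]

-- the heart: A's block traversal and B's column traversal produce the same character list
theorem pvCore (m : List Char) (n : Nat) (hn : 0 < n) (order : List Int)
    (hord : ∀ i ∈ order, ∃ p : Nat, i = (p : Int) ∧ p < n) :
    ((PySem.List.pyRange 0 (m.length : Int) (n : Int)).map
        (fun i => PySem.List.slice m (some i) (some (i + (n : Int))))).foldl
      (fun acc part => order.foldl (fun acc2 idx =>
        if idx < (part.length : Int) then
          acc2 ++ [PySem.List.pyGetD part idx ' ']
        else acc2) acc) []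
    = (let cols : List (List Char) :=
        (PySem.List.pyRange 0 (n : Int) 1).map
          (fun c => (PySem.List.slice? m (some c) none (n : Int)).getD []);
       let rows : Int := if cols.isEmpty then 0 else ((cols.headD []).length : Int);
       (PySem.List.pyRange 0 rows 1).foldl (fun acc r => order.foldl (fun acc2 j =>
         if r < ((PySem.List.pyGetD cols j []).length : Int) then
           acc2 ++ [PySem.List.pyGetD (PySem.List.pyGetD cols j []) r ' ']
         else acc2) acc) []) := by
  have hnI : (0 : Int) < (n : Int) := by omega
  set L := m.length with hL
  set R : Nat := (((L : Int) + n - 1) / n).toNat with hR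
  have hA : ((PySem.List.pyRange 0 (L : Int) (n : Int)).map
        (fun i => PySem.List.slice m (some i) (some (i + (n : Int))))).foldl
      (fun acc part => order.foldl (fun acc2 idx =>
        if idx < (part.length : Int) then
          acc2 ++ [PySem.List.pyGetD part idx ' ']
        else acc2) acc) []
      = (List.range R).flatMap (fun r => order.flatMap (fun i => (m[n * r + i.toNat]?).toList)) := by
    rw [pvNested]
    rw [List.flatMap_map]
    rw [PySem.List.pyRange_of_pos 0 (L : Int) hnI]
    rw [List.flatMap_map]
    have hcount : (if (0 : Int) < (L : Int) then (((L : Int) - 0 + n - 1) / n).toNat else 0) = R := by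
      split
      · rw [hR]; norm_num
      · rw [hR]
        have hL0 : (L : Int) = 0 := by omega
        rw [hL0, zero_add, Int.ediv_eq_zero_of_lt (by omega) (by omega)]
        rfl
    rw [hcount]
    apply List.flatMap_congr
    intro r _
    have hsl : PySem.List.slice m (some (0 + (n : Int) * (r : Int)))
        (some (0 + (n : Int) * (r : Int) + (n : Int))) = (m.drop (n * r)).take n := by
      have h := PySem.List.slice_natCast_add m (n * r) n
      have h1 : ((n * r : Nat) : Int) = 0 + (n : Int) * (r : Int) := by push_cast; ring
      rw [h1] at h
      exact h
    rw [hsl]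
    apply List.flatMap_congr
    intro i hi
    obtain ⟨p, rfl, hp⟩ := hord i hi
    have hlen : (((m.drop (n * r)).take n).length : Int) = ((m.drop (n * r)).take n).length := rfl
    rw [pvGuardGet ((m.drop (n * r)).take n) p ' ']
    rw [List.getElem?_take, if_pos hp, List.getElem?_drop, Int.toNat_natCast]
  rw [hA]
  dsimp only
  have hcols : (PySem.List.pyRange 0 (n : Int) 1).map
      (fun c => (PySem.List.slice? m (some c) none (n : Int)).getD [])
      = (List.range n).map (fun (c : Nat) => (PySem.List.slice? m (some (c : Int)) none (n : Int)).getD []) := by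
    rw [PySem.List.pyRange_one 0 (n : Int), List.map_map]
    have ht : ((n : Int) - 0).toNat = n := by omega
    rw [ht]
    apply List.map_congr_left
    intro a _
    simp
  rw [hcols]
  have hne : ((List.range n).map (fun (c : Nat) => (PySem.List.slice? m (some (c : Int)) none (n : Int)).getD [])).isEmpty = false := by
    simp [List.isEmpty_iff, List.eq_nil_iff_length_eq_zero]
    omega
  rw [hne, if_neg (by simp)]
  have hhead : ((List.range n).map (fun (c : Nat) => (PySem.List.slice? m (some (c : Int)) none (n : Int)).getD [])).headD []
      = (PySem.List.slice? m (some ((0 : Nat) : Int)) none (n : Int)).getD [] := by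
    rw [List.headD_eq_head?, List.head?_eq_getElem?, List.getElem?_map, List.getElem?_range hn]
    rfl
  rw [hhead, Nat.cast_zero, pvCol0Len m n hn, ← hL, ← hR]
  rw [pvNested]
  rw [PySem.List.pyRange_one 0 (R : Int)]
  rw [List.flatMap_map]
  have ht : ((R : Int) - 0).toNat = R := by omega
  rw [ht]
  apply List.flatMap_congr
  intro r _
  apply List.flatMap_congr
  intro j hj
  obtain ⟨p, rfl, hp⟩ := hord j hj
  have hgetcols : PySem.List.pyGetD ((List.range n).map
      (fun (c : Nat) => (PySem.List.slice? m (some (c : Int)) none (n : Int)).getD [])) ((p : Nat) : Int) []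
      = (PySem.List.slice? m (some (p : Int)) none (n : Int)).getD [] := by
    rw [PySem.List.pyGetD_natCast, PySem.List.getD_map_range _ _ _ _ hp]
  rw [hgetcols, zero_add]
  rw [pvGuardGet ((PySem.List.slice? m (some (p : Int)) none (n : Int)).getD []) r ' ']
  rw [pvColGet m n hn p r, Int.toNat_natCast, Nat.add_comm]

-- ===== VERDICT (by name: the statement is the Claim_ definition above) =====
theorem de_nico_spec : Claim_equal_de_nico := by
  intro key message _ hpre
  unfold Pre_de_nico at hpre
  have hk : key.toList ≠ [] := by
    intro hl
    apply hpre
    have := congrArg String.ofList hl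
    simpa using this
  have hn : 0 < key.toList.length := by
    cases h : key.toList with
    | nil => exact absurd h hk
    | cons a l => simp [h]
  unfold Spec_de_nico de_nico de_nico_alt
  exact congrArg String.ofList (congrArg PySem.Chars.rstrip
    (pvCore message.toList key.toList.length hn _ (pvOrderLt key.toList)))
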